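-- pv_equiv track=rewrite | github.com/romance939913/leetcode | stack/candy_crush.py | candy_crush
-- ===== SOURCE A (Python) =====
-- def candy_crush(letters):
--     stack = [[letters[0], 1]]
--
--     i = 1
--     while i < len(letters):
--         if len(stack) == 0:
--             stack.append([letters[i], 1])
--             i += 1
--         elif letters[i] != stack[-1][0]:
--             if stack[-1][1] >= 3:
--                 stack.pop()
--             else:
--                 stack.append([letters[i], 1])
--                 i += 1
--         else:
--             stack[-1] = [letters[i], stack[-1][1] + 1]
--             i += 1
--     if stack[-1][1] >= 3:
--         stack.pop()
--
--     answer = ''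
--     for tup in stack:
--         answer += tup[0] * tup[1]
--
--     return answer
-- ===== SOURCE B (Python) =====
-- def candy_crush(letters):
--     s = letters
--     while True:
--         hit = _first_big_run(s)
--         if hit is None:
--             return s
--         i, j = hit
--         s = s[:i] + s[j:]
--
--
-- def _first_big_run(s):
--     i = 0
--     while i < len(s):
--         j = i + 1
--         while j < len(s) and s[j] == s[i]:
--             j += 1
--         if j - i >= 3:
--             return (i, j)
--         i = j
--     return None
-- ===== Notes on version B (the rewrite author's own statement) =====
-- stated objective: alternative
-- what changed: Replaces A's single amortized stack pass (run-length stack with pop-and-remerge) by a fixpoint loop that rescans the string and deletes the leftmost maximal run of length >= 3 until none remains.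
import Mathlib
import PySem

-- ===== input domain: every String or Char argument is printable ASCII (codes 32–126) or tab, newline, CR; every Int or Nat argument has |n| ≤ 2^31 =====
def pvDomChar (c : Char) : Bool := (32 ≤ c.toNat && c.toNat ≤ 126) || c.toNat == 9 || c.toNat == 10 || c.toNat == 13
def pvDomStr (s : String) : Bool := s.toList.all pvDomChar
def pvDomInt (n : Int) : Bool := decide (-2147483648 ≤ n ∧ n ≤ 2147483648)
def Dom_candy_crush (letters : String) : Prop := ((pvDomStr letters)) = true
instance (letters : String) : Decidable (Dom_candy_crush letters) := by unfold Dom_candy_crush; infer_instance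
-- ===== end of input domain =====

-- B replaces A's single amortized stack pass by a fixpoint loop that repeatedly deletes the
-- leftmost maximal run of length ≥ 3 (objective: alternative algorithm; not faster).

-- ===== PORT A =====
-- A's while loop over index i with a run-length stack; the stack is kept head-first
-- (head = Python's stack[-1]).  Pop does not advance i, exactly as in A.
def ccLoop : List Char → List (Char × Nat) → List (Char × Nat)
  | [], st => st
  | c :: rest, st =>
    match st with
    | [] => ccLoop rest [(c, 1)]
    | (d, n) :: tl =>
      if c ≠ d then
        if n ≥ 3 then ccLoop (c :: rest) tl
        else ccLoop rest ((c, 1) :: (d, n) :: tl)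
      else ccLoop rest ((d, n + 1) :: tl)
termination_by l st => 2 * l.length + st.length

-- A's final `if stack[-1][1] >= 3: stack.pop()` (stack is never empty there in Python)
def ccFinish (st : List (Char × Nat)) : List (Char × Nat) :=
  match st with
  | (d, n) :: tl => if n ≥ 3 then tl else (d, n) :: tl
  | [] => []

-- A's answer loop: concatenate tup[0] * tup[1] bottom-to-top (= reverse of head-first stack)
def ccEmit (st : List (Char × Nat)) : List Char :=
  st.reverse.flatMap (fun p => List.replicate p.2 p.1)

def candy_crush (letters : String) : String :=
  match letters.toList with
  | [] => ""   -- Python evaluates letters[0] and raises IndexError here; excluded by Pre_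
  | c :: rest => String.mk (ccEmit (ccFinish (ccLoop rest [(c, 1)])))

-- ===== PORT B =====
-- inner `while j < len(s) and s[j] == s[i]` of _first_big_run
def scanRun (s : List Char) (c : Char) (j : Nat) : Nat :=
  if j < s.length ∧ s.getD j ' ' = c then scanRun s c (j + 1) else j
termination_by s.length - j
decreasing_by omega

-- termination helper for findBig (cited by its decreasing_by)
theorem scanRun_ge (s : List Char) (c : Char) (j : Nat) : j ≤ scanRun s c j := by
  fun_induction scanRun s c j <;> omega

-- outer `while i < len(s)` of _first_big_run
def findBig (s : List Char) (i : Nat) : Option (Nat × Nat) :=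
  if i < s.length then
    let j := scanRun s (s.getD i ' ') (i + 1)
    if j - i ≥ 3 then some (i, j) else findBig s j
  else none
termination_by s.length - i
decreasing_by have := scanRun_ge s (s.getD i ' ') (i + 1); omega

-- termination helpers for ccFixL (cited by its decreasing_by)
theorem scanRun_le_len (s : List Char) (c : Char) (j : Nat) (h : j ≤ s.length) :
    scanRun s c j ≤ s.length := by
  fun_induction scanRun s c j <;> omega

theorem findBig_bounds (s : List Char) (i : Nat) (hi : i ≤ s.length) (i' j : Nat)
    (h : findBig s i = some (i', j)) : i ≤ i' ∧ i' < s.length ∧ i' + 3 ≤ j ∧ j ≤ s.length := by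
  fun_induction findBig s i with
  | case1 i hlt j' hbig =>
    simp only [Option.some.injEq, Prod.mk.injEq] at h
    have h1 := scanRun_ge s (s.getD i ' ') (i + 1)
    have h2 := scanRun_le_len s (s.getD i ' ') (i + 1) (by omega)
    omega
  | case2 i hlt j' hbig ih =>
    have h1 := scanRun_ge s (s.getD i ' ') (i + 1)
    have h2 := scanRun_le_len s (s.getD i ' ') (i + 1) (by omega)
    have := ih h2 h
    omega
  | case3 i h' => simp at h

-- outer `while True` loop of candy_crush in B: delete the leftmost big run, repeat
def ccFixL (s : List Char) : List Char :=
  match h : findBig s 0 with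
  | some (i, j) => ccFixL (s.take i ++ s.drop j)
  | none => s
termination_by s.length
decreasing_by
  have := findBig_bounds s 0 (by omega) i j h
  simp only [List.length_append, List.length_take, List.length_drop]
  omega

def candy_crush_alt (letters : String) : String :=
  String.mk (ccFixL letters.toList)

-- ===== PRECONDITION & SPEC =====
-- A evaluates letters[0] before its loop, so it raises IndexError on the empty string;
-- Pre_ excludes exactly that input (B returns "" there, see the Raises_ block).
def Pre_candy_crush (letters : String) : Prop := letters ≠ ""
instance (letters : String) : Decidable (Pre_candy_crush letters) := by
  unfold Pre_candy_crush; infer_instance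

def pvWitness_candy_crush : String := "aabbbaac"

def Spec_candy_crush (letters : String) (out : String) : Prop := out = candy_crush_alt letters
instance (letters : String) (out : String) : Decidable (Spec_candy_crush letters out) := by
  unfold Spec_candy_crush; infer_instance

-- ===== CLAIM (what is proved, stated in full; the proofs are below) =====
def Claim_equal_candy_crush : Prop := ∀ (letters : String), Dom_candy_crush letters → Pre_candy_crush letters → Spec_candy_crush letters (candy_crush letters)

-- ===== LEMMAS AND PROOFS =====

-- "no run of length ≥ 3": no three consecutive equal characters
def NoBig (s : List Char) : Prop :=
  ∀ (m : Nat) (c : Char), s[m]? = some c → s[m + 1]? = some c → s[m + 2]? ≠ some c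

-- run-length decomposition (proof-side helper)
def leadLen (c : Char) (l : List Char) : Nat := (l.takeWhile (· = c)).length

def runsOf : List Char → List (Char × Nat)
  | [] => []
  | c :: xs => (c, 1 + leadLen c xs) :: runsOf (xs.drop (leadLen c xs))
termination_by l => l.length
decreasing_by simp only [List.length_drop, List.length_cons]; omega

theorem ccFinish_cons (d : Char) (n : Nat) (tl : List (Char × Nat)) :
    ccFinish ((d, n) :: tl) = if n ≥ 3 then tl else (d, n) :: tl := rfl

-- A's result as a function of the char list
def AfunL (s : List Char) : List Char := ccEmit (ccFinish (ccLoop s []))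

theorem ccLoop_append (u v : List Char) (st : List (Char × Nat)) :
    ccLoop (u ++ v) st = ccLoop v (ccLoop u st) := by
  fun_induction ccLoop u st with
  | case1 st => rfl
  | case2 c rest ih => simpa [ccLoop] using ih
  | case3 c rest d n tl hne hge ih => simpa [ccLoop, hne, hge] using ih
  | case4 c rest d n tl hne hge ih => simpa [ccLoop, hne, hge] using ih
  | case5 c rest d n tl hne ih => simpa [ccLoop, hne] using ih

theorem ccLoop_merge (m : Nat) (c : Char) (n : Nat) (tl : List (Char × Nat)) :
    ccLoop (List.replicate m c) ((c, n) :: tl) = (c, n + m) :: tl := by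
  induction m generalizing n with
  | zero => simp [ccLoop]
  | succ m ih =>
    rw [List.replicate_succ]
    simp only [ccLoop, ne_eq, not_true_eq_false, if_false]
    simpa [Nat.add_assoc, Nat.add_comm 1 m] using ih (n + 1)

theorem ccLoop_push (k : Nat) (hk : 1 ≤ k) (c : Char) (st : List (Char × Nat))
    (hst : st = [] ∨ ∃ d n tl, st = (d, n) :: tl ∧ c ≠ d ∧ n < 3) :
    ccLoop (List.replicate k c) st = (c, k) :: st := by
  obtain ⟨m, rfl⟩ : ∃ m, k = m + 1 := ⟨k - 1, by omega⟩
  rw [List.replicate_succ]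
  rcases hst with rfl | ⟨d, n, tl, rfl, hne, hlt⟩
  · simp only [ccLoop]
    simpa [Nat.add_comm] using ccLoop_merge m c 1 []
  · simp only [ccLoop, hne, if_neg (by omega : ¬ n ≥ 3), ite_not]
    simpa [Nat.add_comm] using ccLoop_merge m c 1 ((d, n) :: tl)

theorem lead_get (c : Char) (l : List Char) (n : Nat) (h : n < leadLen c l) :
    l[n]? = some c := by
  induction l generalizing n with
  | nil => simp [leadLen] at h
  | cons x xs ih =>
    by_cases hx : x = c
    · cases n with
      | zero => simp [hx]
      | succ n =>
        simp only [leadLen, List.takeWhile, hx] at h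
        simp only [decide_true, List.length_cons] at h
        simpa using ih n (by simpa [leadLen] using by omega)
    · simp [leadLen, List.takeWhile, hx] at h

theorem lead_stop (c : Char) (l : List Char) (w : Char)
    (h : l[leadLen c l]? = some w) : w ≠ c := by
  induction l with
  | nil => simp at h
  | cons x xs ih =>
    by_cases hx : x = c
    · simp only [leadLen, List.takeWhile, hx, decide_true, List.length_cons] at h
      exact ih (by simpa [leadLen] using h)
    · simp only [leadLen, List.takeWhile, hx, decide_false, List.length_nil] at h
      simp only [List.getElem?_cons_zero, Option.some.injEq] at h
      subst h
      exact hx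

theorem takeWhile_replicate (c : Char) (xs : List Char) :
    xs.takeWhile (· = c) = List.replicate (leadLen c xs) c := by
  induction xs with
  | nil => simp [leadLen]
  | cons x t ih =>
    by_cases hx : x = c
    · simp [leadLen, List.takeWhile, hx, List.replicate_succ] at ih ⊢
      simpa [leadLen] using ih
    · simp [leadLen, List.takeWhile, hx]

theorem drop_leadLen (c : Char) (xs : List Char) :
    xs.drop (leadLen c xs) = xs.dropWhile (· = c) := by
  induction xs with
  | nil => simp
  | cons x t ih =>
    by_cases hx : x = c
    · simpa [leadLen, List.takeWhile, List.dropWhile, hx] using ih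
    · simp [leadLen, List.takeWhile, List.dropWhile, hx]

theorem run_split (c : Char) (xs : List Char) :
    c :: xs = List.replicate (1 + leadLen c xs) c ++ xs.drop (leadLen c xs) := by
  rw [Nat.add_comm, List.replicate_succ, drop_leadLen]
  simpa using (takeWhile_replicate c xs ▸ List.takeWhile_append_dropWhile (p := (· = c)) (l := xs)).symm

theorem runsOf_cons (c : Char) (xs : List Char) :
    runsOf (c :: xs) = (c, 1 + leadLen c xs) :: runsOf (xs.drop (leadLen c xs)) := by
  conv_lhs => rw [runsOf.eq_def]

theorem runsOf_flat (u : List Char) :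
    (runsOf u).flatMap (fun p => List.replicate p.2 p.1) = u := by
  fun_induction runsOf u with
  | case1 => rfl
  | case2 c xs ih =>
    simp only [List.flatMap_cons, ih]
    exact (run_split c xs).symm

theorem runsOf_last (u : List Char) (h : u ≠ []) :
    ∃ n rs, runsOf u = rs ++ [(u.getLast h, n)] ∧ 1 ≤ n := by
  fun_induction runsOf u with
  | case1 => exact absurd rfl h
  | case2 c xs ih =>
    by_cases hr : xs.drop (leadLen c xs) = []
    · refine ⟨1 + leadLen c xs, [], ?_, by omega⟩
      have hu : c :: xs = List.replicate (1 + leadLen c xs) c := by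
        simpa [hr] using run_split c xs
      have hlast : (c :: xs).getLast h = c := by
        have h1 : (c :: xs).getLast? = some c := by
          rw [hu, Nat.add_comm, List.replicate_succ']
          exact List.getLast?_concat
        have h2 := List.getLast?_eq_some_getLast (l := c :: xs) h
        rw [h2] at h1
        exact Option.some_injective _ h1.symm |>.symm
      rw [hr, hlast]
      simp [runsOf]
    · obtain ⟨n, rs, hrs, hn⟩ := ih hr
      refine ⟨n, (c, 1 + leadLen c xs) :: rs, ?_, hn⟩
      have hlast : (c :: xs).getLast h = (xs.drop (leadLen c xs)).getLast hr := by
        have h1 : (c :: xs).getLast? = (xs.drop (leadLen c xs)).getLast? := by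
          conv_lhs => rw [run_split c xs]
          exact List.getLast?_append_of_ne_nil _ hr
        rw [List.getLast?_eq_some_getLast (l := c :: xs) h,
            List.getLast?_eq_some_getLast (l := xs.drop (leadLen c xs)) hr] at h1
        exact Option.some_injective _ h1
      rw [hlast, hrs]
      simp

theorem NoBig_drop (u : List Char) (k : Nat) (h : NoBig u) : NoBig (u.drop k) := by
  intro m c h1 h2 h3
  rw [List.getElem?_drop] at h1 h2 h3
  exact h (k + m) c h1 h2 h3

theorem runsOf_bounds (u : List Char) (h : NoBig u) :
    ∀ p ∈ runsOf u, 1 ≤ p.2 ∧ p.2 < 3 := by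
  fun_induction runsOf u with
  | case1 => simp
  | case2 c xs ih =>
    intro p hp

    rcases List.mem_cons.1 hp with rfl | hp
    · refine ⟨by omega, ?_⟩
      by_contra hge
      have hL : 2 ≤ leadLen c xs := by simp only [not_lt] at hge; omega
      have h0 : (c :: xs)[0]? = some c := by simp
      have h1 : (c :: xs)[1]? = some c := by
        simpa using lead_get c xs 0 (by omega)
      have h2 : (c :: xs)[2]? = some c := by
        simpa using lead_get c xs 1 (by omega)
      exact h 0 c h0 h1 h2
    · have hnb : NoBig (xs.drop (leadLen c xs)) := by
        have := NoBig_drop (c :: xs) (1 + leadLen c xs) h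
        simpa [Nat.add_comm] using this
      exact ih hnb p hp

-- processing a reduced string never pops: the stack is its reversed run list
theorem ccLoop_reduced (u : List Char) (st : List (Char × Nat)) (h : NoBig u)
    (hst : st = [] ∨ ∃ d n tl, st = (d, n) :: tl ∧ (∀ w, u.head? = some w → w ≠ d) ∧ n < 3) :
    ccLoop u st = (runsOf u).reverse ++ st := by
  induction hn : u.length using Nat.strong_induction_on generalizing u st with
  | _ n ih =>
  subst hn
  match u with
  | [] => simp [ccLoop, runsOf]
  | c :: xs =>
    have hmem : (c, 1 + leadLen c xs) ∈ runsOf (c :: xs) := by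
      rw [runsOf_cons]; exact List.mem_cons_self ..
    have hlt : 1 + leadLen c xs < 3 := (runsOf_bounds _ h _ hmem).2
    have hshape : st = [] ∨ ∃ d n tl, st = (d, n) :: tl ∧ c ≠ d ∧ n < 3 := by
      rcases hst with rfl | ⟨d, n, tl, rfl, hw, hn3⟩
      · exact Or.inl rfl
      · exact Or.inr ⟨d, n, tl, rfl, fun hc => hw c rfl (hc ▸ rfl), hn3⟩
    have hnbr : NoBig (xs.drop (leadLen c xs)) := by
      have := NoBig_drop (c :: xs) (1 + leadLen c xs) h
      simpa [Nat.add_comm] using this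
    have hlen : (xs.drop (leadLen c xs)).length < (c :: xs).length := by
      simp only [List.length_drop, List.length_cons]; omega
    calc ccLoop (c :: xs) st
        = ccLoop (List.replicate (1 + leadLen c xs) c ++ xs.drop (leadLen c xs)) st := by
          conv_lhs => rw [run_split c xs]
      _ = ccLoop (xs.drop (leadLen c xs)) ((c, 1 + leadLen c xs) :: st) := by
          rw [ccLoop_append, ccLoop_push _ (by omega) _ _ hshape]
      _ = (runsOf (xs.drop (leadLen c xs))).reverse ++ (c, 1 + leadLen c xs) :: st := by
          refine ih _ hlen _ ((c, 1 + leadLen c xs) :: st) hnbr ?_ rfl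
          right
          refine ⟨c, 1 + leadLen c xs, st, rfl, ?_, hlt⟩
          intro w hw
          rw [List.head?_drop] at hw
          exact lead_stop c xs w hw
      _ = (runsOf (c :: xs)).reverse ++ st := by
          rw [runsOf_cons]; simp

theorem AfunL_reduced (s : List Char) (h : NoBig s) : AfunL s = s := by
  unfold AfunL
  rw [ccLoop_reduced s [] h (Or.inl rfl)]
  match hs : s with
  | [] => simp [runsOf, ccFinish, ccEmit]
  | c :: xs =>
    obtain ⟨n, rs, hrs, _⟩ := runsOf_last (c :: xs) (by simp)
    have hn3 : n < 3 := (runsOf_bounds _ h _ (hrs ▸ List.mem_append_right rs (List.mem_singleton.2 rfl))).2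
    rw [hrs]
    simp only [List.append_nil, List.reverse_append, List.reverse_cons, List.reverse_nil,
      List.nil_append, List.singleton_append]
    rw [ccFinish_cons, if_neg (by omega)]
    unfold ccEmit
    rw [List.reverse_cons, List.reverse_reverse, ← hrs]
    exact runsOf_flat (c :: xs)

-- deleting the leftmost maximal run of length ≥ 3 does not change A's result
theorem AfunL_key (u v : List Char) (c : Char) (k : Nat) (hk : 3 ≤ k) (hu : NoBig u)
    (hlast : ∀ (h : u ≠ []), u.getLast h ≠ c) (hv : ∀ w, v.head? = some w → w ≠ c) :
    AfunL (u ++ List.replicate k c ++ v) = AfunL (u ++ v) := by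
  unfold AfunL
  rw [ccLoop_append, ccLoop_append, ccLoop_append (st := [])]
  rw [ccLoop_reduced u [] hu (Or.inl rfl)]
  set su := (runsOf u).reverse ++ ([] : List (Char × Nat)) with hsu
  have hpush : ccLoop (List.replicate k c) su = (c, k) :: su := by
    apply ccLoop_push _ (by omega)
    match hue : u with
    | [] => left; simp [hsu, runsOf]
    | x :: xs =>
      right
      obtain ⟨n, rs, hrs, _⟩ := runsOf_last (x :: xs) (by simp)
      have hn3 : n < 3 := (runsOf_bounds _ hu _ (hrs ▸ List.mem_append_right rs (List.mem_singleton.2 rfl))).2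
      refine ⟨(x :: xs).getLast (by simp), n, rs.reverse, ?_, (hlast (by simp)).symm, hn3⟩
      simp [hsu, hrs]
  have hv0 := hv
  rw [hpush]
  match hv : v with
  | [] =>
    show ccEmit (ccFinish (ccLoop [] ((c, k) :: su))) = ccEmit (ccFinish (ccLoop [] su))
    simp only [ccLoop]
    have h1 : ccFinish ((c, k) :: su) = su := by rw [ccFinish_cons, if_pos (by omega)]
    rw [h1]
    match hue : u with
    | [] => simp [hsu, runsOf, ccFinish]
    | x :: xs =>
      obtain ⟨n, rs, hrs, _⟩ := runsOf_last (x :: xs) (by simp)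
      have hn3 : n < 3 := (runsOf_bounds _ hu _ (hrs ▸ List.mem_append_right rs (List.mem_singleton.2 rfl))).2
      have h2 : ccFinish su = su := by
        rw [hsu, hrs]
        simp only [List.append_nil, List.reverse_append, List.reverse_cons, List.reverse_nil,
          List.nil_append, List.singleton_append]
        rw [ccFinish_cons, if_neg (by omega)]
      rw [h2]
  | w :: v' =>
    have hw : w ≠ c := hv0 w rfl
    have hstep : ccLoop (w :: v') ((c, k) :: su) = ccLoop (w :: v') su := by
      simp [ccLoop, hw, hk]
    rw [hstep]

theorem scanRun_spec (s : List Char) (c : Char) (j : Nat) :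
    (∀ m, j ≤ m → m < scanRun s c j → s[m]? = some c) ∧
    (s.length ≤ scanRun s c j ∨ s[scanRun s c j]? ≠ some c) := by
  fun_induction scanRun s c j with
  | case1 j h ih =>
    refine ⟨?_, ih.2⟩
    intro m hm1 hm2
    rcases Nat.eq_or_lt_of_le hm1 with rfl | hlt
    · rw [List.getElem?_eq_getElem h.1]
      rw [List.getD_eq_getElem?_getD, List.getElem?_eq_getElem h.1] at h
      exact congrArg some h.2
    · exact ih.1 m hlt hm2
  | case2 j h =>
    rw [Decidable.not_and_iff_not_or_not] at h
    refine ⟨fun m hm1 hm2 => absurd (Nat.lt_of_le_of_lt hm1 hm2) (by omega), ?_⟩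
    rcases h with h | h
    · exact Or.inl (by omega)
    · by_cases hj : j < s.length
      · refine Or.inr ?_
        rw [List.getD_eq_getElem?_getD, List.getElem?_eq_getElem hj] at h
        rw [List.getElem?_eq_getElem hj]
        exact fun hc => h (by simpa using hc)
      · exact Or.inl (by omega)

theorem findBig_none (s : List Char) (i : Nat) (hi : i ≤ s.length)
    (hb : i = 0 ∨ ∀ c, s[i - 1]? = some c → s[i]? ≠ some c)
    (hp : ∀ m c, m + 3 ≤ i → s[m]? = some c → s[m + 1]? = some c → s[m + 2]? ≠ some c)
    (h : findBig s i = none) : NoBig s := by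
  fun_induction findBig s i with
  | case1 i hlt j' hbig => simp at h
  | case2 i hlt j' hbig ih =>
    have hs := scanRun_spec s (s.getD i ' ') (i + 1)
    have hge := scanRun_ge s (s.getD i ' ') (i + 1)
    have hle := scanRun_le_len s (s.getD i ' ') (i + 1) (by omega)
    have hieq : s[i]? = some (s.getD i ' ') := by
      rw [List.getD_eq_getElem?_getD, List.getElem?_eq_getElem hlt]
      rfl
    refine ih hle ?_ ?_ h
    · refine Or.inr fun d h1 h2 => ?_
      have he : s[scanRun s (s.getD i ' ') (i + 1) - 1]? = some (s.getD i ' ') := by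
        rcases Nat.eq_or_lt_of_le hge with he' | he'
        · rw [← he']; simpa [← he'] using hieq
        · exact hs.1 _ (by omega) (by omega)
      rw [he] at h1
      cases h1
      rcases hs.2 with hlen | hne
      · rw [List.getElem?_eq_none (by omega)] at h2; cases h2
      · exact hne h2
    · intro m d hm3 g1 g2 g3
      by_cases hmi : m + 3 ≤ i
      · exact hp m d hmi g1 g2 g3
      · by_cases hgem : i ≤ m
        · exact hbig (by omega)
        · have hi0 : i ≠ 0 := by omega
          rcases hb with rfl | hb
          · omega
          · have e1 : s[i - 1]? = some d := by
              rcases (by omega : i - 1 = m ∨ i - 1 = m + 1) with he | he <;> rw [he] <;> assumption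
            have e2 : s[i]? = some d := by
              rcases (by omega : i = m + 1 ∨ i = m + 2) with he | he <;> rw [he] <;> assumption
            exact hb d e1 e2
  | case3 i hnlt =>
    intro m d g1 g2 g3
    have hm2 : m + 2 < s.length := by
      by_contra hh
      rw [List.getElem?_eq_none (by omega)] at g3
      cases g3
    exact hp m d (by omega) g1 g2 g3

theorem findBig_some (s : List Char) (i0 : Nat) (hi : i0 ≤ s.length)
    (hb : i0 = 0 ∨ ∀ c, s[i0 - 1]? = some c → s[i0]? ≠ some c)
    (hp : ∀ m c, m + 3 ≤ i0 → s[m]? = some c → s[m + 1]? = some c → s[m + 2]? ≠ some c)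
    (i j : Nat) (h : findBig s i0 = some (i, j)) :
    (∀ m c, m + 3 ≤ i → s[m]? = some c → s[m + 1]? = some c → s[m + 2]? ≠ some c) ∧
    (i = 0 ∨ ∀ c, s[i - 1]? = some c → s[i]? ≠ some c) ∧
    (∀ m, i ≤ m → m < j → s[m]? = s[i]?) ∧
    s[j]? ≠ s[i]? := by
  fun_induction findBig s i0 with
  | case1 i hlt j' hbig =>
    simp only [Option.some.injEq, Prod.mk.injEq] at h
    obtain ⟨rfl, rfl⟩ := h
    have hs := scanRun_spec s (s.getD i ' ') (i + 1)
    have hge := scanRun_ge s (s.getD i ' ') (i + 1)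
    have hieq : s[i]? = some (s.getD i ' ') := by
      rw [List.getD_eq_getElem?_getD, List.getElem?_eq_getElem hlt]
      rfl
    refine ⟨hp, hb, ?_, ?_⟩
    · intro m hm1 hm2
      rcases Nat.eq_or_lt_of_le hm1 with rfl | hlt'
      · rfl
      · rw [hs.1 m (by omega) hm2, hieq]
    · rcases hs.2 with hlen | hne
      · rw [List.getElem?_eq_none (by omega), hieq]; exact fun hc => by cases hc
      · rw [hieq]; exact hne
  | case2 i hlt j' hbig ih =>
    have hs := scanRun_spec s (s.getD i ' ') (i + 1)
    have hge := scanRun_ge s (s.getD i ' ') (i + 1)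
    have hle := scanRun_le_len s (s.getD i ' ') (i + 1) (by omega)
    have hieq : s[i]? = some (s.getD i ' ') := by
      rw [List.getD_eq_getElem?_getD, List.getElem?_eq_getElem hlt]
      rfl
    refine ih hle ?_ ?_ h
    · refine Or.inr fun d h1 h2 => ?_
      have he : s[scanRun s (s.getD i ' ') (i + 1) - 1]? = some (s.getD i ' ') := by
        rcases Nat.eq_or_lt_of_le hge with he' | he'
        · rw [← he']; simpa [← he'] using hieq
        · exact hs.1 _ (by omega) (by omega)
      rw [he] at h1
      cases h1
      rcases hs.2 with hlen | hne
      · rw [List.getElem?_eq_none (by omega)] at h2; cases h2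
      · exact hne h2
    · intro m d hm3 g1 g2 g3
      by_cases hmi : m + 3 ≤ i
      · exact hp m d hmi g1 g2 g3
      · by_cases hgem : i ≤ m
        · exact hbig (by omega)
        · have hi0 : i ≠ 0 := by omega
          rcases hb with rfl | hb
          · omega
          · have e1 : s[i - 1]? = some d := by
              rcases (by omega : i - 1 = m ∨ i - 1 = m + 1) with he | he <;> rw [he] <;> assumption
            have e2 : s[i]? = some d := by
              rcases (by omega : i = m + 1 ∨ i = m + 2) with he | he <;> rw [he] <;> assumption
            exact hb d e1 e2
  | case3 i hnlt => simp at h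

theorem take_NoBig (s : List Char) (i : Nat)
    (hp : ∀ m c, m + 3 ≤ i → s[m]? = some c → s[m + 1]? = some c → s[m + 2]? ≠ some c) :
    NoBig (s.take i) := by
  intro m c g1 g2 g3
  have h2 : m + 2 < (s.take i).length := by
    by_contra hh
    rw [List.getElem?_eq_none (by omega)] at g3
    cases g3
  rw [List.length_take] at h2
  rw [List.getElem?_take_of_lt (by omega)] at g1 g2 g3
  exact hp m c (by omega) g1 g2 g3

theorem AfunL_eq_ccFixL (s : List Char) : AfunL s = ccFixL s := by
  fun_induction ccFixL s with
  | case1 s i j hfb ih =>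
    have hbounds := findBig_bounds s 0 (Nat.zero_le _) i j hfb
    obtain ⟨hp', hb', hrun, hright⟩ := findBig_some s 0 (Nat.zero_le _) (Or.inl rfl)
      (fun m c hm _ _ => absurd hm (by omega)) i j hfb
    have hilt : i < s.length := by omega
    have hieq : s[i]? = some (s[i]'hilt) := List.getElem?_eq_getElem hilt
    have hdecomp : s = s.take i ++ (List.replicate (j - i) (s[i]'hilt) ++ s.drop j) := by
      apply List.ext_getElem?
      intro n
      by_cases h1 : n < i
      · rw [List.getElem?_append_left (by rw [List.length_take]; omega),
          List.getElem?_take_of_lt h1]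
      · rw [List.getElem?_append_right (by rw [List.length_take]; omega), List.length_take,
          Nat.min_eq_left (by omega)]
        by_cases h2 : n < j
        · rw [List.getElem?_append_left (by rw [List.length_replicate]; omega),
            List.getElem?_replicate, if_pos (by omega), ← hieq]
          exact hrun n (by omega) h2
        · rw [List.getElem?_append_right (by rw [List.length_replicate]; omega),
            List.length_replicate, List.getElem?_drop]
          congr 1
          omega
    have hlast : ∀ (h0 : s.take i ≠ []), (s.take i).getLast h0 ≠ s[i]'hilt := by
      intro h0 hceq
      have hi0 : i ≠ 0 := by
        intro hz
        subst hz
        simp at h0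
      have hlq : (s.take i).getLast? = (s.take i)[i - 1]? := by
        rw [List.getLast?_eq_getElem?]
        congr 1
        rw [List.length_take]
        omega
      rw [List.getLast?_eq_some_getLast h0, hceq, List.getElem?_take_of_lt (by omega)] at hlq
      rcases hb' with h' | hbb
      · omega
      · exact hbb _ hlq.symm hieq
    have hv : ∀ w, (s.drop j).head? = some w → w ≠ s[i]'hilt := by
      intro w hw hceq
      rw [List.head?_drop] at hw
      subst hceq
      exact hright (by rw [hw, hieq])
    have hkey : AfunL s = AfunL (s.take i ++ s.drop j) := by
      conv_lhs => rw [hdecomp]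
      rw [← List.append_assoc]
      exact AfunL_key (s.take i) (s.drop j) (s[i]'hilt) (j - i) (by omega)
        (take_NoBig s i hp') hlast hv
    rw [hkey, ih]
  | case2 s hfb =>
    exact AfunL_reduced s (findBig_none s 0 (Nat.zero_le _) (Or.inl rfl)
      (fun m c hm _ _ => absurd hm (by omega)) hfb)

-- ===== VERDICT (by name: the statement is the Claim_ definition above) =====
theorem candy_crush_spec : Claim_equal_candy_crush := by
  intro letters _ _
  unfold Spec_candy_crush candy_crush_alt candy_crush
  cases hl : letters.toList with
  | nil =>
    have hf : findBig ([] : List Char) 0 = none := by simp [findBig]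
    rw [ccFixL.eq_def, hf]
    rfl
  | cons c rest =>
    show String.mk (ccEmit (ccFinish (ccLoop rest [(c, 1)]))) = String.mk (ccFixL (c :: rest))
    have h1 : ccLoop rest [(c, 1)] = ccLoop (c :: rest) [] := by simp [ccLoop]
    rw [h1]
    exact congrArg String.mk (AfunL_eq_ccFixL (c :: rest))
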